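-- pv_equiv track=rewrite | github.com/AntoineMaillard06/webScraper | src/utils/args.py | get_next_args
-- ===== SOURCE A (Python) =====
-- def get_next_args(list_arg: [str], arg: str):
--     next_args = []
--     is_next_arg = False
--
--     for actual_arg in list_arg:
--         if is_next_arg and actual_arg[0] == '-':
--             return next_args
--         elif is_next_arg:
--             next_args.append(actual_arg)
--         if actual_arg == arg:
--             is_next_arg = True
--     return next_args
-- ===== SOURCE B (Python) =====
-- def get_next_args(list_arg: [str], arg: str):
--     try:
--         idx = list_arg.index(arg)
--     except ValueError:
--         return []
--     collected = []
--     for s in list_arg[idx + 1:]: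
--         if s[0] == '-':
--             break
--         collected.append(s)
--     return collected
-- ===== Notes on version B (the rewrite author's own statement) =====
-- stated objective: simpler
-- what changed: Replaces A's single stateful flag-tracking loop over the whole list with a two-phase search-then-take decomposition: locate the flag with list.index (returning [] when absent) and then collect from the slice after it until an element starting with '-'.
import Mathlib
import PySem

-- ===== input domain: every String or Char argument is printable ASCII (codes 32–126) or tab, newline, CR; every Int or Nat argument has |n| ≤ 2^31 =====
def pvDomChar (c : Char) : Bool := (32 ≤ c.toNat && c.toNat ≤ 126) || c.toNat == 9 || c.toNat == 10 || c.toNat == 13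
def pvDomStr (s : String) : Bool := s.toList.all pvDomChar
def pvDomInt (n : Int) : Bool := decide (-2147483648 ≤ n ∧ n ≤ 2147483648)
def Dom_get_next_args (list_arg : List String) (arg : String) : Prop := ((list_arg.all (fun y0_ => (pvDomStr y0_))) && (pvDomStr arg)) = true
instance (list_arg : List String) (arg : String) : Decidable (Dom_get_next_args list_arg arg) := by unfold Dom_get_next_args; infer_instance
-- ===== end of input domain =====

-- ===== PORT A =====
-- B replaces A's stateful flag-tracking loop by search-then-take over the slice after the flag; objective: simpler.
-- Loop of A: state = (accumulated next_args, is_next_arg flag); early 'return' = stopping the recursion.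
def pvGoA (arg : String) : List String → List String → Bool → List String
  | [], acc, _ => acc
  | a :: rest, acc, true =>
      match PySem.List.pyGet? a.toList 0 with
      | none => acc            -- actual_arg[0] raises IndexError in Python; excluded by Pre_
      | some c =>
        if c = '-' then acc
        else pvGoA arg rest (acc ++ [a]) (if a == arg then true else true)
  | a :: rest, acc, false => pvGoA arg rest acc (a == arg)

def get_next_args (list_arg : List String) (arg : String) : List String :=
  pvGoA arg list_arg [] false

-- ===== PORT B =====
-- the for-loop of Source B over the slice, with 'break' on a leading '-'
def pvTakeDash : List String → List String
  | [] => []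
  | s :: rest =>
      match PySem.List.pyGet? s.toList 0 with
      | none => []             -- s[0] raises IndexError in Python; excluded by Pre_
      | some c => if c = '-' then [] else s :: pvTakeDash rest

def get_next_args_alt (list_arg : List String) (arg : String) : List String :=
  match PySem.List.index? list_arg arg with
  | none => []
  | some idx => pvTakeDash (PySem.List.slice list_arg (some ((idx : Int) + 1)) none)

-- ===== PRECONDITION & SPEC =====
-- Pre_ excludes exactly the inputs where the Python A raises IndexError: those where, after the
-- first occurrence of arg, an empty string appears before any element starting with '-'.
def Pre_get_next_args (list_arg : List String) (arg : String) : Prop :=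
  ((list_arg.idxOf? arg).all (fun i =>
    (((list_arg.drop (i + 1)).dropWhile
        (fun s => match s.toList.head? with | some c => c != '-' | none => false)).head?.all
      (fun s => s != "")))) = true
instance (list_arg : List String) (arg : String) : Decidable (Pre_get_next_args list_arg arg) := by
  unfold Pre_get_next_args; infer_instance
def pvWitness_get_next_args : List String × String := (["-f", "x", "y", "-v"], "-f")

def Spec_get_next_args (list_arg : List String) (arg : String) (out : List String) : Prop := out = get_next_args_alt list_arg arg
instance (list_arg : List String) (arg : String) (out : List String) : Decidable (Spec_get_next_args list_arg arg out) := by unfold Spec_get_next_args; infer_instance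

-- ===== CLAIM (what is proved, stated in full; the proofs are below) =====
def Claim_equal_get_next_args : Prop := ∀ (list_arg : List String) (arg : String), Dom_get_next_args list_arg arg → Pre_get_next_args list_arg arg → Spec_get_next_args list_arg arg (get_next_args list_arg arg)

-- ===== LEMMAS AND PROOFS =====
theorem pvGoA_true (arg : String) (rest acc : List String) :
    pvGoA arg rest acc true = acc ++ pvTakeDash rest := by
  induction rest generalizing acc with
  | nil => simp [pvGoA, pvTakeDash]
  | cons a r ih =>
      simp only [pvGoA, pvTakeDash]
      cases PySem.List.pyGet? a.toList 0 with
      | none => simp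
      | some c =>
          by_cases hc : c = '-' <;> simp [hc, ih]

theorem pvGoA_false (arg : String) (l : List String) :
    pvGoA arg l [] false =
      (match PySem.List.index? l arg with
       | none => []
       | some i => pvTakeDash (l.drop (i + 1))) := by
  induction l with
  | nil => simp [pvGoA]
  | cons a r ih =>
      by_cases h : a = arg
      · subst h
        have h1 : pvGoA a (a :: r) [] false = pvGoA a r [] true := by simp [pvGoA]
        rw [h1, pvGoA_true, PySem.List.index?_cons_self]
        simp
      · have hb : (a == arg) = false := by simp [h]
        have h1 : pvGoA arg (a :: r) [] false = pvGoA arg r [] false := by simp [pvGoA, hb]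
        rw [h1, ih, PySem.List.index?_cons_of_ne r h]
        cases PySem.List.index? r arg with
        | none => rfl
        | some i => simp [List.drop_succ_cons]

theorem alt_eq (l : List String) (arg : String) :
    get_next_args_alt l arg =
      (match PySem.List.index? l arg with
       | none => []
       | some i => pvTakeDash (l.drop (i + 1))) := by
  unfold get_next_args_alt
  cases PySem.List.index? l arg with
  | none => rfl
  | some i =>
      have : ((i : Int) + 1) = (((i + 1 : Nat)) : Int) := by push_cast; ring
      simp only [this, PySem.List.slice_from_natCast]

-- ===== VERDICT (by name: the statement is the Claim_ definition above) =====
theorem get_next_args_spec : Claim_equal_get_next_args := by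
  intro list_arg arg _ _
  unfold Spec_get_next_args get_next_args
  rw [alt_eq, pvGoA_false]
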